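-- pv_equiv track=rewrite | github.com/Filkoss/algoritmizace | 18.4/lodicky2.py | boat_brute_force
-- ===== SOURCE A (Python) =====
-- import itertools
--
-- def compute_rating(seating, n):
--     """
--     seating: list délky n (váha pasažéra nebo None).
--     Vrátí rating = (váha vpravo) - (váha vlevo).
--     - Pokud je n sudé, pravá = index >= n//2, levá = index < n//2.
--     - Pokud je n liché, pravá = index > n//2, levá = index < n//2.
--       (prostřední sedačka se nepočítá ani vpravo, ani vlevo).
--     """
--     mid = n // 2
--
--     left_sum = sum(x for i, x in enumerate(seating)
--                    if x is not None and i < mid)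
--
--     # pravá strana
--     if n % 2 == 0:
--         right_sum = sum(x for i, x in enumerate(seating)
--                         if x is not None and i >= mid)
--     else:
--         right_sum = sum(x for i, x in enumerate(seating)
--                         if x is not None and i > mid)
--
--     return right_sum - left_sum
--
-- def boat_brute_force(weights, n):
--     """
--     Brute force:
--     1) Vybereme 3 sedačky z n (kombinace).
--     2) Zkusíme všech 6 permutací pasažérů.
--     3) Vybereme uspořádání s minimálním |rating|.
--     """
--     best_solutions = []
--     best_abs_diff = None
--
--     for combo in itertools.combinations(range(n), 3):
--         for perm in itertools.permutations(weights):
--             seating = [None] * n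
--             seating[combo[0]] = perm[0]
--             seating[combo[1]] = perm[1]
--             seating[combo[2]] = perm[2]
--
--             rating = compute_rating(seating, n)
--             if best_abs_diff is None or abs(rating) < best_abs_diff:
--                 best_abs_diff = abs(rating)
--                 best_solutions = [seating]
--             elif abs(rating) == best_abs_diff:
--                 best_solutions.append(seating)
--
--     return best_solutions, best_abs_diff
-- ===== SOURCE B (Python) =====
-- import itertools
--
-- def _side(i, n):
--     # sign of seat i in the rating: -1 left of mid, +1 right, 0 middle seat (odd n)
--     mid = n // 2
--     if i < mid:
--         return -1
--     if n % 2 == 0 or i > mid: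
--         return 1
--     return 0
--
-- def _rating(combo, perm, n):
--     # rating computed arithmetically from the three occupied seats; no seating list
--     return sum(_side(combo[t], n) * perm[t] for t in range(3))
--
-- def _seating(combo, perm, n):
--     s = [None] * n
--     s[combo[0]] = perm[0]
--     s[combo[1]] = perm[1]
--     s[combo[2]] = perm[2]
--     return s
--
-- def boat_brute_force(weights, n):
--     combos = list(itertools.combinations(range(n), 3))
--     if not combos:
--         return [], None
--     perms = list(itertools.permutations(weights))
--     # pass 1: the optimum |rating|, pure arithmetic (no seating lists built)
--     best = min(abs(_rating(c, p, n)) for c in combos for p in perms)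
--     # pass 2: materialize seatings only for the optimal candidates, in encounter order
--     sols = [_seating(c, p, n) for c in combos for p in perms
--             if abs(_rating(c, p, n)) == best]
--     return sols, best
-- ===== Notes on version B (the rewrite author's own statement) =====
-- stated objective: alternative
-- what changed: A's single scan that builds a length-n seating per candidate and tracks the best list statefully is replaced by: an arithmetic per-candidate rating from the three occupied seat signs (no seating list built for scoring), a first pass taking only the minimum |rating|, and a second pass materializing seatings only for the optimal candidates.
import Mathlib
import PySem

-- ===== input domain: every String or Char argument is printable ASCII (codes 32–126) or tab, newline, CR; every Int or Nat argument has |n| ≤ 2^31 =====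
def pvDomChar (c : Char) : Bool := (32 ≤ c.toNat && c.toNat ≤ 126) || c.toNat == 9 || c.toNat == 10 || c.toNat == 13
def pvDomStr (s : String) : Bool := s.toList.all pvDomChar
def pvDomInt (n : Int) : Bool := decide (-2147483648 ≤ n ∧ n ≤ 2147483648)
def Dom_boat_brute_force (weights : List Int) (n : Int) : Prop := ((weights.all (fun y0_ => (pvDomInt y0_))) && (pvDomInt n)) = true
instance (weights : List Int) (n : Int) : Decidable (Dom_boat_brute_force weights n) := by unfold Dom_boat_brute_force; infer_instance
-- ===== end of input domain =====

-- B replaces A's single stateful best-tracking scan over built seatings by: a per-candidate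
-- arithmetic rating over the three occupied seat signs (no length-n seating built for scoring),
-- a first pass taking only the minimum |rating|, and a second pass that materializes seatings
-- solely for the optimal candidates; objective: alternative.

-- ===== PORT A =====
-- Source B helper _seating (the three seat assignments); defined first so its match
-- auxiliary is not attributed to either port's family
def mkSeating (combo perm : List Int) (n : Int) : List (Option Int) :=
  match combo, perm with
  | [i, j, k], a :: b :: c :: _ =>
      (((List.replicate n.toNat (none : Option Int)).set i.toNat (some a)).set j.toNat (some b)).set k.toNat (some c)
  | _, _ => []   -- perm shorter than 3: Python raises IndexError here; excluded by Pre_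

-- shared helper: compute_rating (helper of Source A, used only by A)
def compute_rating (seating : List (Option Int)) (n : Int) : Int :=
  let mid := PySem.Int.floordiv n 2
  let left_sum := (PySem.List.enumerate seating).foldl
    (fun s p => match p.2 with
      | some x => if p.1 < mid then s + x else s
      | none => s) 0
  let right_sum :=
    if PySem.Int.mod n 2 = 0 then
      (PySem.List.enumerate seating).foldl
        (fun s p => match p.2 with
          | some x => if mid ≤ p.1 then s + x else s
          | none => s) 0
    else
      (PySem.List.enumerate seating).foldl
        (fun s p => match p.2 with
          | some x => if mid < p.1 then s + x else s
          | none => s) 0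
  right_sum - left_sum

def boat_brute_force (weights : List Int) (n : Int) : List (List (Option Int)) × Option Int :=
  let combos := PySem.List.combinations (PySem.List.pyRange 0 n 1) 3
  let perms := PySem.List.permutations weights weights.length
  combos.foldl (fun st combo =>
    perms.foldl (fun st perm =>
      let seating : List (Option Int) :=
        match combo, perm with
        | [i, j, k], a :: b :: c :: _ =>
            -- combo indices come from range(n): nonnegative and < n, so .set at .toNat is Python's assignment
            (((List.replicate n.toNat (none : Option Int)).set i.toNat (some a)).set j.toNat (some b)).set k.toNat (some c)
        | _, _ => []   -- perm shorter than 3: Python raises IndexError here; excluded by Pre_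
      let rating := compute_rating seating n
      match st.2 with
      | none => ([seating], some |rating|)
      | some d =>
          if |rating| < d then ([seating], some |rating|)
          else if |rating| = d then (st.1 ++ [seating], some d)
          else st) st) ([], none)

-- ===== PORT B =====
-- Source B helper _side: sign of seat i in the rating
def side (i n : Int) : Int :=
  let mid := PySem.Int.floordiv n 2
  if i < mid then -1
  else if PySem.Int.mod n 2 = 0 ∨ mid < i then 1
  else 0

-- Source B helper _rating: sum(_side(combo[t], n) * perm[t] for t in range(3));
-- the getD default is unreachable inside Pre_ (Python raises IndexError outside it)
def ratingOf (combo perm : List Int) (n : Int) : Int :=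
  (PySem.List.pyRange 0 3 1).foldl
    (fun s t => s + side (PySem.List.pyGetD combo t 0) n * PySem.List.pyGetD perm t 0) 0

def boat_brute_force_alt (weights : List Int) (n : Int) : List (List (Option Int)) × Option Int :=
  let combos := PySem.List.combinations (PySem.List.pyRange 0 n 1) 3
  if combos.isEmpty then ([], none)
  else
    let perms := PySem.List.permutations weights weights.length
    let best := PySem.List.min?
      (combos.flatMap (fun c => perms.map (fun p => |ratingOf c p n|))) (fun y => y)
    match best with
    | none => ([], none)   -- unreachable (combos and perms are nonempty); Python's min would raise ValueError on an empty iterable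
    | some b =>
        (combos.flatMap (fun c =>
          (perms.filter (fun p => |ratingOf c p n| == b)).map (fun p => mkSeating c p n)),
         some b)

-- ===== PRECONDITION & SPEC =====
-- Pre_ excludes exactly the inputs on which A raises IndexError (n ≥ 3, i.e. at least one
-- seat combination, with fewer than 3 weights: perm[2] is out of range); B raises there too.
def Pre_boat_brute_force (weights : List Int) (n : Int) : Prop := 3 ≤ n → 3 ≤ (weights.length : Int)
instance (weights : List Int) (n : Int) : Decidable (Pre_boat_brute_force weights n) := by unfold Pre_boat_brute_force; infer_instance
def pvWitness_boat_brute_force : List Int × Int := ([1, 2, 3], 4)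

def Spec_boat_brute_force (weights : List Int) (n : Int) (out : List (List (Option Int)) × Option Int) : Prop := out = boat_brute_force_alt weights n
instance (weights : List Int) (n : Int) (out : List (List (Option Int)) × Option Int) : Decidable (Spec_boat_brute_force weights n out) := by unfold Spec_boat_brute_force; infer_instance

-- ===== CLAIM (what is proved, stated in full; the proofs are below) =====
def Claim_equal_boat_brute_force : Prop := ∀ (weights : List Int) (n : Int), Dom_boat_brute_force weights n → Pre_boat_brute_force weights n → Spec_boat_brute_force weights n (boat_brute_force weights n)

-- ===== LEMMAS AND PROOFS =====

-- A's running-best update, as a function of the state and one (seating, |rating|) candidate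
def stepFn (st : List (List (Option Int)) × Option Int) (c : List (Option Int) × Int) :
    List (List (Option Int)) × Option Int :=
  match st.2 with
  | none => ([c.1], some c.2)
  | some d =>
      if c.2 < d then ([c.1], some c.2)
      else if c.2 = d then (st.1 ++ [c.1], some d)
      else st

def candOf (n : Int) (c p : List Int) : List (Option Int) × Int :=
  (mkSeating c p n, |compute_rating (mkSeating c p n) n|)

-- the per-seat rating contribution A's compute_rating sums
def gSide (n : Int) (p : Int × Option Int) : Int :=
  match p.2 with
  | some x => side p.1 n * x
  | none => 0

lemma foldl_foldl_flatMap {α β σ : Type} (f : σ → β → σ) (g : α → List β)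
    (l : List α) (init : σ) :
    l.foldl (fun st a => (g a).foldl f st) init = (l.flatMap g).foldl f init := by
  induction l generalizing init with
  | nil => rfl
  | cons a t ih => simp [List.flatMap_cons, List.foldl_append, ih]

lemma run_some (L : List (List (Option Int) × Int)) :
    ∀ (bs : List (List (Option Int))) (d : Int),
    L.foldl stepFn (bs, some d) =
      ((if (L.map Prod.snd).foldl min d = d then bs else []) ++
         (L.filter (fun c => c.2 == (L.map Prod.snd).foldl min d)).map Prod.fst,
       some ((L.map Prod.snd).foldl min d)) := by
  induction L with
  | nil => intro bs d; simp
  | cons c t ih =>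
    intro bs d
    simp only [List.foldl_cons, List.map_cons, List.filter_cons]
    by_cases h1 : c.2 < d
    · have hmin : min d c.2 = c.2 := min_eq_right h1.le
      have hM := (PySem.List.foldl_min_le (t.map Prod.snd) c.2).1
      simp only [stepFn, hmin, if_pos h1]
      rw [ih [c.1] c.2]
      generalize hg : (t.map Prod.snd).foldl min c.2 = m at hM ⊢
      have hne : ¬ m = d := by omega
      by_cases h : c.2 = m
      · simp [h, hne]
      · simp only [if_neg hne, if_neg h, beq_iff_eq]
        rw [if_neg (fun hh : m = c.2 => h (Eq.symm hh))]
    · by_cases h2 : c.2 = d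
      · subst h2
        have hmin : min c.2 c.2 = c.2 := min_self c.2
        simp only [stepFn, lt_irrefl, if_false, if_true, hmin]
        rw [ih (bs ++ [c.1]) c.2]
        generalize (t.map Prod.snd).foldl min c.2 = m
        by_cases h : m = c.2
        · simp [h]
        · simp [h]
          rw [if_neg (fun hh : c.2 = m => h (Eq.symm hh))]
      · have hd : d < c.2 := by omega
        have hmin : min d c.2 = d := min_eq_left hd.le
        have hM := (PySem.List.foldl_min_le (t.map Prod.snd) d).1
        simp only [stepFn, if_neg h1, if_neg h2, hmin]
        rw [ih bs d]
        have hne : ¬ c.2 = (t.map Prod.snd).foldl min d := by omega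
        simp [hne]

lemma select_eq (L : List (List (Option Int) × Int)) :
    L.foldl stepFn ([], none) =
      (match L with
       | [] => ([], none)
       | r :: t =>
           let best := (t.map Prod.snd).foldl min r.2
           ((L.filter (fun sd => sd.2 == best)).map Prod.fst, some best)) := by
  match L with
  | [] => rfl
  | r :: t =>
    have hstep : stepFn ([], none) r = ([r.1], some r.2) := rfl
    simp only [List.foldl_cons, hstep]
    rw [run_some t [r.1] r.2]
    simp only [List.filter_cons]
    by_cases h : r.2 = (t.map Prod.snd).foldl min r.2
    · simp [← h]
    · have h' : ¬ (t.map Prod.snd).foldl min r.2 = r.2 := fun hh => h hh.symm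
      simp [h, h']

-- A's compute_rating is the sum of per-seat signed contributions
lemma compute_rating_eq_sum (s : List (Option Int)) (n : Int) :
    compute_rating s n = ((PySem.List.enumerate s).map (gSide n)).sum := by
  unfold compute_rating
  set mid := PySem.Int.floordiv n 2 with hmid
  have hcond : ∀ (P : Int → Prop) [DecidablePred P],
      (PySem.List.enumerate s).foldl
        (fun a p => match p.2 with
          | some x => if P p.1 then a + x else a
          | none => a) 0 =
      ((PySem.List.enumerate s).map
        (fun p => match p.2 with
          | some x => if P p.1 then x else 0
          | none => 0)).sum := by
    intro P _
    rw [show (fun (a : Int) (p : Int × Option Int) => match p.2 with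
        | some x => if P p.1 then a + x else a
        | none => a) = (fun a p => a + (match p.2 with
          | some x => if P p.1 then x else 0
          | none => 0)) from by
      funext a p; rcases p with ⟨i, x⟩
      cases x with
      | none => simp
      | some v => simp only []; split <;> simp]
    rw [PySem.List.foldl_add]; simp
  by_cases hpar : PySem.Int.mod n 2 = 0
  · simp only [if_pos hpar]
    rw [hcond (fun i => i < mid), hcond (fun i => mid ≤ i)]
    have hadd : (((PySem.List.enumerate s).map (gSide n)).sum +
        ((PySem.List.enumerate s).map
          (fun p => match p.2 with
            | some x => if p.1 < mid then x else 0
            | none => 0)).sum) =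
        ((PySem.List.enumerate s).map
          (fun p => match p.2 with
            | some x => if mid ≤ p.1 then x else 0
            | none => 0)).sum := by
      rw [← List.sum_map_add]
      apply congrArg List.sum
      apply List.map_congr_left
      intro p _
      rcases p with ⟨i, x⟩
      cases x with
      | none => simp [gSide]
      | some v =>
        have hside : side i n = if i < mid then -1 else 1 := by
          simp only [side, ← hmid]
          split_ifs with h1 h2
          · rfl
          · rfl
          · exact absurd (Or.inl hpar) h2
        simp only [gSide, hside]
        by_cases h : i < mid
        · simp only [if_pos h, if_neg (not_le.mpr h)]; ring
        · simp only [if_neg h, if_pos (not_lt.mp h)]; ring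
    beta_reduce
    linarith [hadd]
  · simp only [if_neg hpar]
    rw [hcond (fun i => i < mid), hcond (fun i => mid < i)]
    have hadd : (((PySem.List.enumerate s).map (gSide n)).sum +
        ((PySem.List.enumerate s).map
          (fun p => match p.2 with
            | some x => if p.1 < mid then x else 0
            | none => 0)).sum) =
        ((PySem.List.enumerate s).map
          (fun p => match p.2 with
            | some x => if mid < p.1 then x else 0
            | none => 0)).sum := by
      rw [← List.sum_map_add]
      apply congrArg List.sum
      apply List.map_congr_left
      intro p _
      rcases p with ⟨i, x⟩
      cases x with
      | none => simp [gSide]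
      | some v =>
        have hside : side i n = if i < mid then -1 else if mid < i then 1 else 0 := by
          simp only [side, ← hmid]
          split_ifs with h1 h2 h3 <;> first | rfl | tauto
        simp only [gSide, hside]
        by_cases h : i < mid
        · simp only [if_pos h, if_neg (show ¬ mid < i by omega)]; ring
        · by_cases h2 : mid < i
          · simp only [if_neg h, if_pos h2]; ring
          · simp only [if_neg h, if_neg h2]; ring
    beta_reduce
    linarith [hadd]

-- base: an all-empty boat has rating-sum 0 (any enumerate start)
lemma sum_gSide_replicate (n : Int) (m : Nat) (st : Int) :
    ((PySem.List.enumerate (List.replicate m (none : Option Int)) st).map (gSide n)).sum = 0 := by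
  induction m generalizing st with
  | zero => simp [PySem.List.enumerate_nil]
  | succ k ih => simp [List.replicate_succ, PySem.List.enumerate_cons, gSide, ih]

-- seating one passenger adds exactly his signed contribution
lemma sum_gSide_set (n : Int) (s : List (Option Int)) (t : Nat) (a : Int)
    (ht : s[t]? = some none) : ∀ st : Int,
    ((PySem.List.enumerate (s.set t (some a)) st).map (gSide n)).sum =
      ((PySem.List.enumerate s st).map (gSide n)).sum + side (st + t) n * a := by
  induction s generalizing t with
  | nil => simp at ht
  | cons x xs ih =>
    intro st
    cases t with
    | zero =>
      simp only [List.getElem?_cons_zero, Option.some.injEq] at ht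
      subst ht
      simp [PySem.List.enumerate_cons, gSide]
      ring
    | succ k =>
      simp only [List.getElem?_cons_succ] at ht
      simp only [List.set_cons_succ, PySem.List.enumerate_cons, List.map_cons, List.sum_cons,
        ih k ht (st + 1)]
      push_cast
      ring_nf

-- B's arithmetic rating equals A's compute_rating of the built seating
lemma rating_eq (n i j k a b c : Int) (rest : List Int)
    (h0 : 0 ≤ i) (hij : i < j) (hjk : j < k) (hk : k < n) :
    compute_rating (mkSeating [i, j, k] (a :: b :: c :: rest) n) n =
      ratingOf [i, j, k] (a :: b :: c :: rest) n := by
  have hpy : PySem.List.pyRange 0 3 1 = [0, 1, 2] := by decide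
  have hi : (i.toNat : Int) = i := Int.toNat_of_nonneg h0
  have hj : (j.toNat : Int) = j := Int.toNat_of_nonneg (by omega)
  have hkN : (k.toNat : Int) = k := Int.toNat_of_nonneg (by omega)
  have hin : i.toNat < n.toNat := by omega
  have hjn : j.toNat < n.toNat := by omega
  have hkn : k.toNat < n.toNat := by omega
  have hij' : i.toNat ≠ j.toNat := by omega
  have hik' : i.toNat ≠ k.toNat := by omega
  have hjk' : j.toNat ≠ k.toNat := by omega
  unfold ratingOf mkSeating
  rw [hpy]
  simp only [List.foldl_cons, List.foldl_nil]
  have hg0 : PySem.List.pyGetD [i, j, k] (0 : Int) 0 = i := rfl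
  have hg1 : PySem.List.pyGetD [i, j, k] (1 : Int) 0 = j := rfl
  have hg2 : PySem.List.pyGetD [i, j, k] (2 : Int) 0 = k := rfl
  have hp0 : PySem.List.pyGetD (a :: b :: c :: rest) (0 : Int) 0 = a := by
    rw [PySem.List.pyGetD_ofNat']; rfl
  have hp1 : PySem.List.pyGetD (a :: b :: c :: rest) (1 : Int) 0 = b := by
    rw [PySem.List.pyGetD_ofNat']; rfl
  have hp2 : PySem.List.pyGetD (a :: b :: c :: rest) (2 : Int) 0 = c := by
    rw [PySem.List.pyGetD_ofNat']; rfl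
  rw [hg0, hg1, hg2, hp0, hp1, hp2]
  rw [compute_rating_eq_sum]
  have e1 : (((List.replicate n.toNat (none : Option Int)).set i.toNat (some a)))[j.toNat]? = some none := by
    rw [List.getElem?_set_ne (by omega)]
    simp [hjn]
  have e2 : ((((List.replicate n.toNat (none : Option Int)).set i.toNat (some a)).set j.toNat (some b)))[k.toNat]? = some none := by
    rw [List.getElem?_set_ne (by omega), List.getElem?_set_ne (by omega)]
    simp [hkn]
  have e0 : (List.replicate n.toNat (none : Option Int))[i.toNat]? = some none := by
    simp [hin]
  rw [sum_gSide_set n _ k.toNat c e2 0, sum_gSide_set n _ j.toNat b e1 0,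
      sum_gSide_set n _ i.toNat a e0 0, sum_gSide_replicate]
  rw [zero_add, zero_add, zero_add, zero_add, hi, hj, hkN]
  ring

-- shape of a member of combinations(range(n), 3)
lemma combo_shape (n : Int) (c : List Int)
    (hc : c ∈ PySem.List.combinations (PySem.List.pyRange 0 n 1) 3) :
    ∃ i j k, c = [i, j, k] ∧ 0 ≤ i ∧ i < j ∧ j < k ∧ k < n := by
  obtain ⟨hsub, hlen⟩ := (PySem.List.mem_combinations_iff _ _ _).1 hc
  match c, hlen with
  | [i, j, k], _ =>
    have hpw : ([i, j, k] : List Int).Pairwise (· < ·) :=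
      (PySem.List.pairwise_lt_pyRange_one 0 n).sublist hsub
    have hmem : ∀ x ∈ [i, j, k], x ∈ PySem.List.pyRange 0 n 1 := fun x hx => hsub.subset hx
    have hi := (PySem.List.mem_pyRange_one).1 (hmem i (by simp))
    have hk := (PySem.List.mem_pyRange_one).1 (hmem k (by simp))
    simp only [List.pairwise_cons, List.mem_cons] at hpw
    exact ⟨i, j, k, rfl, hi.1, by tauto, by tauto, hk.2⟩

-- candidates agree pointwise under Pre_
lemma cand_eq (weights : List Int) (n : Int) (hw : 3 ≤ n → 3 ≤ (weights.length : Int))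
    (c : List Int) (hc : c ∈ PySem.List.combinations (PySem.List.pyRange 0 n 1) 3)
    (p : List Int) (hp : p ∈ PySem.List.permutations weights weights.length) :
    candOf n c p = (mkSeating c p n, |ratingOf c p n|) := by
  obtain ⟨i, j, k, hcc, h0, hij, hjk, hkn⟩ := combo_shape n c hc
  have hn3 : 3 ≤ n := by omega
  have hplen : p.length = weights.length :=
    (PySem.List.perm_of_mem_permutations hp).length_eq
  have hl3 : 3 ≤ p.length := by omega
  match p, hl3 with
  | a :: b :: cc :: rest, _ =>
    subst hcc
    unfold candOf
    rw [rating_eq n i j k a b cc rest h0 hij hjk hkn]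

lemma ports_agree (weights : List Int) (n : Int)
    (hw : 3 ≤ n → 3 ≤ (weights.length : Int)) :
    boat_brute_force weights n = boat_brute_force_alt weights n := by
  unfold boat_brute_force boat_brute_force_alt
  have hinner : ∀ combo : List Int,
      (fun (st : List (List (Option Int)) × Option Int) perm =>
        let seating : List (Option Int) :=
          match combo, perm with
          | [i, j, k], a :: b :: c :: _ =>
              (((List.replicate n.toNat (none : Option Int)).set i.toNat (some a)).set j.toNat (some b)).set k.toNat (some c)
          | _, _ => []
        let rating := compute_rating seating n
        match st.2 with
        | none => ([seating], some |rating|)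
        | some d =>
            if |rating| < d then ([seating], some |rating|)
            else if |rating| = d then (st.1 ++ [seating], some d)
            else st) = (fun st perm => stepFn st (candOf n combo perm)) := by
    intro combo; rfl
  simp only [hinner]
  set combos := PySem.List.combinations (PySem.List.pyRange 0 n 1) 3 with hcombos
  set perms := PySem.List.permutations weights weights.length with hperms
  have hA : combos.foldl (fun st combo => perms.foldl (fun st perm => stepFn st (candOf n combo perm)) st) ([], none) =
        (combos.flatMap (fun c => perms.map (candOf n c))).foldl stepFn ([], none) := by
    rw [← foldl_foldl_flatMap stepFn (fun c => perms.map (candOf n c)) combos ([], none)]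
    simp [List.foldl_map]
  rw [hA, select_eq]
  -- rewrite A's candidate list using the pointwise agreement
  have hLcong : combos.flatMap (fun c => perms.map (candOf n c)) =
      combos.flatMap (fun c => perms.map (fun p => (mkSeating c p n, |ratingOf c p n|))) := by
    apply List.flatMap_congr
    intro c hc
    apply List.map_congr_left
    intro p hp
    exact cand_eq weights n hw c hc p hp
  rw [hLcong]
  -- compare with B
  generalize hL : combos.flatMap (fun c => perms.map (fun p => (mkSeating c p n, |ratingOf c p n|))) = L
  have hsnd : combos.flatMap (fun c => perms.map (fun p => |ratingOf c p n|)) = L.map Prod.snd := by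
    rw [← hL]
    simp [List.map_flatMap, List.map_map, Function.comp_def]
  rw [hsnd]
  by_cases hce : combos.isEmpty
  · have h0 : combos = [] := by simpa using hce
    rw [← hL, h0]
    simp
  rw [if_neg hce]
  have hfst : ∀ b : Int, combos.flatMap (fun c =>
      (perms.filter (fun p => |ratingOf c p n| == b)).map (fun p => mkSeating c p n)) =
      (L.filter (fun sd => sd.2 == b)).map Prod.fst := by
    intro b
    rw [← hL]
    simp only [List.filter_flatMap, List.map_flatMap, List.filter_map, List.map_map,
      Function.comp_def]
  cases L with
  | nil => simp [PySem.List.min?]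
  | cons r t =>
    simp only [List.map_cons]
    rw [PySem.List.min?_id_cons]
    dsimp only
    rw [hfst]

-- ===== VERDICT (by name: the statement is the Claim_ definition above) =====
theorem boat_brute_force_spec : Claim_equal_boat_brute_force := by
  intro weights n _ hpre
  unfold Spec_boat_brute_force
  exact ports_agree weights n hpre
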